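-- pv_equiv track=rewrite | github.com/Jacob-Elafandi/project-euler | Library/matrixfns.py | row_matrix_pow_mult
-- ===== SOURCE A (Python) =====
-- def matrixmult(mat1, mat2, mod=0):
--     result = [ [0 for x in range(len(mat2[0]))] for y in range(len(mat1))]
--     for row in range(len(result)):
--         for col in range(len(result[0])):
--             for i in range(len(mat1[0])):
--                 result[row][col] += mat1[row][i] * mat2[i][col]
--                 if mod != 0:
--                     result[row][col] %= mod
--     return result
--
-- def row_matrix_pow_mult(row_in, mat_in, power, mod=0):
--     row = row_in[:]
--     mat = [matrow[:] for matrow in mat_in]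
--     while power:
--         if power % 2:
--             new_row = [0 for x in range(len(row))]
--             for x in range(len(row)):
--                 for y in range(len(row)):
--                     new_row[x] += row[y] * mat[y][x]
--                 if mod != 0:
--                     new_row[x] %= mod
--             row = new_row
--         power //= 2
--         if power:
--             mat = matrixmult(mat, mat, mod)
--     return row
-- ===== SOURCE B (Python) =====
-- def row_matrix_pow_mult(row_in, mat_in, power, mod=0):
--     if power == 0:
--         return row_in[:]
--     n = len(mat_in)
--     reduce = (lambda x: x % mod) if mod != 0 else (lambda x: x)
--
--     def mat_mul(a, b):
--         return [[reduce(sum(a[r][i] * b[i][c] for i in range(n)))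
--                  for c in range(n)] for r in range(n)]
--
--     result = [[1 if r == c else 0 for c in range(n)] for r in range(n)]
--     base = [matrow[:] for matrow in mat_in]
--     while power:
--         if power % 2:
--             result = mat_mul(result, base)
--         power //= 2
--         if power:
--             base = mat_mul(base, base)
--     return [reduce(sum(row_in[y] * result[y][x] for y in range(n)))
--             for x in range(len(row_in))]
-- ===== Notes on version B (the rewrite author's own statement) =====
-- stated objective: alternative
-- what changed: A interleaves the binary exponentiation with the row vector, re-multiplying the row by the current squared matrix at every set bit; B first computes the full matrix power P = mat^power by binary exponentiation into an identity-initialized accumulator (reducing mod at each product) and then performs a single row-vector-times-matrix multiply of row_in by P, with sum() comprehensions instead of A's in-place += loops with per-step mod.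
-- outside the precondition, e.g. on row_matrix_pow_mult([1], [[2, 0], [0, 3]], 2, 0): A returns [4], B raises IndexError
import Mathlib
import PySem

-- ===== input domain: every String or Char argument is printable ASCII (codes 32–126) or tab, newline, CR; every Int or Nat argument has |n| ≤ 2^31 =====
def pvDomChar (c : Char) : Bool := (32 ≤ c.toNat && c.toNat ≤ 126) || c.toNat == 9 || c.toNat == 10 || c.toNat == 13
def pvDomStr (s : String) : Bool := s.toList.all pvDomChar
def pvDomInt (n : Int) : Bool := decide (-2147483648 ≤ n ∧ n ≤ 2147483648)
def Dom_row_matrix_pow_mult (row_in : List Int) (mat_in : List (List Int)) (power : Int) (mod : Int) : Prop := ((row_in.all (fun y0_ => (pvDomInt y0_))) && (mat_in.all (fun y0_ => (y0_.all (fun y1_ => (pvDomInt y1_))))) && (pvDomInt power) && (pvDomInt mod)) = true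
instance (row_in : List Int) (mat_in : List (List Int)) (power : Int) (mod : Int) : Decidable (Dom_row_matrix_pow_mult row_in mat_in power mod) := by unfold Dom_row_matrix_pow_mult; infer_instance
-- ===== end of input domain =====

-- B replaces A's interleaved row-by-matrix updates with matrix binary exponentiation into an
-- identity-initialized accumulator followed by ONE row-vector times matrix multiply (objective:
-- alternative decomposition; return value proved equal on Pre_).

-- ===== PORT A =====
-- matrixmult: indexing is total via getD (Pre_ keeps every index in range; Python raises there);
-- len(mat2[0]) on an empty matrix is ported as (headD []).length (Python raises; outside Pre_).
def pvMatrixMultA (mat1 mat2 : List (List Int)) (mod : Int) : List (List Int) :=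
  (List.range mat1.length).map (fun row =>
    (List.range (mat2.headD []).length).map (fun col =>
      (List.range ((mat1.headD []).length)).foldl
        (fun acc i =>
          let acc' := acc + (mat1.getD row []).getD i 0 * (mat2.getD i []).getD col 0
          if mod ≠ 0 then PySem.Int.mod acc' mod else acc') 0))

-- the body of A's `if power % 2:` branch: new_row built index by index
def pvRowMultA (row : List Int) (mat : List (List Int)) (mod : Int) : List Int :=
  (List.range row.length).map (fun x =>
    let s := (List.range row.length).foldl
      (fun acc y => acc + row.getD y 0 * (mat.getD y []).getD x 0) 0
    if mod ≠ 0 then PySem.Int.mod s mod else s)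

-- A's `while power:` loop on the Nat value of power (negative power never terminates in Python
-- and is outside Pre_)
def pvLoopA (row : List Int) (mat : List (List Int)) (p : Nat) (mod : Int) : List Int :=
  if h : p = 0 then row
  else
    let row' := if p % 2 = 1 then pvRowMultA row mat mod else row
    let p' := p / 2
    if p' = 0 then row' else pvLoopA row' (pvMatrixMultA mat mat mod) p' mod
termination_by p
decreasing_by omega

def row_matrix_pow_mult (row_in : List Int) (mat_in : List (List Int)) (power : Int) (mod : Int) : List Int :=
  pvLoopA row_in (mat_in.map (fun matrow => matrow)) power.toNat mod

-- ===== PORT B =====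
-- B's `reduce = (lambda x: x % mod) if mod != 0 else (lambda x: x)`
def pvRedB (mod x : Int) : Int := if mod ≠ 0 then PySem.Int.mod x mod else x

-- B's mat_mul: one sum comprehension per entry, reduced once
def pvMatMulB (n : Nat) (a b : List (List Int)) (mod : Int) : List (List Int) :=
  (List.range n).map (fun r => (List.range n).map (fun c =>
    pvRedB mod (((List.range n).map
      (fun i => (a.getD r []).getD i 0 * (b.getD i []).getD c 0)).sum)))

-- B's identity matrix
def pvIdB (n : Nat) : List (List Int) :=
  (List.range n).map (fun r => (List.range n).map (fun c => if r = c then (1 : Int) else 0))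

-- B's `while power:` loop accumulating the matrix power (negative power is outside Pre_)
def pvLoopB (n : Nat) (result base : List (List Int)) (p : Nat) (mod : Int) : List (List Int) :=
  if h : p = 0 then result
  else
    let result' := if p % 2 = 1 then pvMatMulB n result base mod else result
    let p' := p / 2
    if p' = 0 then result' else pvLoopB n result' (pvMatMulB n base base mod) p' mod
termination_by p
decreasing_by omega

def row_matrix_pow_mult_alt (row_in : List Int) (mat_in : List (List Int)) (power : Int) (mod : Int) : List Int :=
  if power = 0 then row_in
  else
    let n := mat_in.length
    let R := pvLoopB n (pvIdB n) (mat_in.map (fun matrow => matrow)) power.toNat mod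
    (List.range row_in.length).map (fun x =>
      pvRedB mod (((List.range n).map
        (fun y => row_in.getD y 0 * (R.getD y []).getD x 0)).sum))

-- ===== PRECONDITION & SPEC =====
-- Pre_ excludes: negative powers (A's `while power:` loop never terminates); for power ≥ 1,
-- shapes on which A raises IndexError (matrix smaller than the row or, for power ≥ 2, ragged or
-- empty); and matrices strictly larger than the row, whose extra rows/columns A's final row
-- accidentally truncates while still feeding them into the squaring (B raises IndexError there).
def Pre_row_matrix_pow_mult (row_in : List Int) (mat_in : List (List Int)) (power : Int) (mod : Int) : Prop :=
  0 ≤ power ∧ (power = 0 ∨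
    (mat_in.length = row_in.length ∧ (∀ r ∈ mat_in, r.length = row_in.length) ∧
      (1 < power → row_in ≠ [])))
instance (row_in : List Int) (mat_in : List (List Int)) (power : Int) (mod : Int) : Decidable (Pre_row_matrix_pow_mult row_in mat_in power mod) := by unfold Pre_row_matrix_pow_mult; infer_instance

def pvWitness_row_matrix_pow_mult : List Int × List (List Int) × Int × Int :=
  ([1, 2], [[1, 2], [3, 4]], 3, 5)

def Spec_row_matrix_pow_mult (row_in : List Int) (mat_in : List (List Int)) (power : Int) (mod : Int) (out : List Int) : Prop := out = row_matrix_pow_mult_alt row_in mat_in power mod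
instance (row_in : List Int) (mat_in : List (List Int)) (power : Int) (mod : Int) (out : List Int) : Decidable (Spec_row_matrix_pow_mult row_in mat_in power mod out) := by unfold Spec_row_matrix_pow_mult; infer_instance

-- ===== CLAIM (what is proved, stated in full; the proofs are below) =====
def Claim_equal_row_matrix_pow_mult : Prop := ∀ (row_in : List Int) (mat_in : List (List Int)) (power : Int) (mod : Int), Dom_row_matrix_pow_mult row_in mat_in power mod → Pre_row_matrix_pow_mult row_in mat_in power mod → Spec_row_matrix_pow_mult row_in mat_in power mod (row_matrix_pow_mult row_in mat_in power mod)

-- ===== LEMMAS AND PROOFS =====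

-- entry access (0 out of range; Pre_ keeps all real accesses in range)
def pvG (v : List Int) (i : Nat) : Int := v.getD i 0
def pvGG (M : List (List Int)) (r c : Nat) : Int := (M.getD r []).getD c 0

-- exact (unreduced) row·matrix, matrix·matrix and matrix power, all n×n index-based
def pvVM (n : Nat) (v : List Int) (M : List (List Int)) : List Int :=
  (List.range n).map (fun x => ∑ y ∈ Finset.range n, pvG v y * pvGG M y x)
def pvMM (n : Nat) (A B : List (List Int)) : List (List Int) :=
  (List.range n).map (fun r => (List.range n).map (fun c =>
    ∑ i ∈ Finset.range n, pvGG A r i * pvGG B i c))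
def pvPow (n : Nat) (M : List (List Int)) : Nat → List (List Int)
  | 0 => pvIdB n
  | k + 1 => pvMM n (pvPow n M k) M

def pvShape (n : Nat) (M : List (List Int)) : Prop :=
  M.length = n ∧ ∀ r ∈ M, r.length = n

-- entrywise congruence mod m on the top-left n×n block / first n entries
def pvVEq (m : Int) (n : Nat) (v w : List Int) : Prop :=
  ∀ x < n, pvG v x ≡ pvG w x [ZMOD m]
def pvMEq (m : Int) (n : Nat) (A B : List (List Int)) : Prop :=
  ∀ r c, r < n → c < n → pvGG A r c ≡ pvGG B r c [ZMOD m]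

theorem pvRed_modeq (m a : Int) : pvRedB m a ≡ a [ZMOD m] := by
  unfold pvRedB
  split
  · exact (Int.modEq_iff_dvd.mpr ⟨PySem.Int.floordiv a m, by
      have h := PySem.Int.floordiv_mul_add_mod a m
      linarith⟩)
  · rfl

theorem pvRed_congr (m : Int) {a b : Int} (h : a ≡ b [ZMOD m]) : pvRedB m a = pvRedB m b := by
  rcases eq_or_ne m 0 with hm | hm
  · subst hm
    have : a = b := by simpa [Int.ModEq, Int.emod_zero] using h
    rw [this]
  · simp only [pvRedB, if_pos hm]
    rcases lt_or_gt_of_ne hm with hneg | hpos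
    · have h1 := PySem.Int.mod_neg_bounds (a := a) hneg
      have h2 := PySem.Int.mod_neg_bounds (a := b) hneg
      have e1 : PySem.Int.mod a m ≡ a [ZMOD m] := by
        have := pvRed_modeq m a; simpa [pvRedB, if_pos hm] using this
      have e2 : PySem.Int.mod b m ≡ b [ZMOD m] := by
        have := pvRed_modeq m b; simpa [pvRedB, if_pos hm] using this
      have e : PySem.Int.mod a m ≡ PySem.Int.mod b m [ZMOD m] :=
        e1.trans (h.trans e2.symm)
      obtain ⟨t, ht⟩ := Int.ModEq.dvd e
      have ht0 : t = 0 := by nlinarith [h1.1, h1.2, h2.1, h2.2]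
      rw [ht0, mul_zero] at ht
      omega
    · rw [PySem.Int.mod_eq_emod_of_pos hpos, PySem.Int.mod_eq_emod_of_pos hpos]
      exact h

theorem pvFold_sum (k : Nat) (f : Nat → Int) (s : Int) :
    (List.range k).foldl (fun a y => a + f y) s = s + ∑ y ∈ Finset.range k, f y := by
  induction k generalizing s with
  | zero => simp
  | succ k ih => rw [List.range_succ, List.foldl_append, ih, Finset.sum_range_succ]; simp; ring

theorem pvMod_zero (m : Int) : PySem.Int.mod 0 m = 0 :=
  (PySem.Int.mod_eq_zero_iff_dvd 0 m).mpr (dvd_zero m)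

theorem pvFold_red (m : Int) (k : Nat) (f : Nat → Int) :
    (List.range k).foldl (fun acc i =>
        let acc' := acc + f i
        if m ≠ 0 then PySem.Int.mod acc' m else acc') 0
      = pvRedB m (∑ i ∈ Finset.range k, f i) := by
  rcases eq_or_ne m 0 with hm | hm
  · subst hm
    simpa [pvRedB] using pvFold_sum k f 0
  · have h : ∀ k (s : Int), (List.range k).foldl (fun acc i =>
        let acc' := acc + f i
        if m ≠ 0 then PySem.Int.mod acc' m else acc') s
        = if k = 0 then s else PySem.Int.mod (s + ∑ i ∈ Finset.range k, f i) m := by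
      intro k
      induction k with
      | zero => intro s; simp
      | succ k ih =>
        intro s
        rw [List.range_succ, List.foldl_append, ih]
        rcases eq_or_ne k 0 with hk | hk
        · subst hk; simp [hm]
        · rw [if_neg hk, if_neg (Nat.succ_ne_zero k)]
          simp only [List.foldl, if_pos hm, Finset.sum_range_succ]
          have e := pvRed_modeq m (s + ∑ i ∈ Finset.range k, f i)
          simp only [pvRedB, if_pos hm] at e
          have hc : PySem.Int.mod (s + ∑ i ∈ Finset.range k, f i) m + f k ≡
              s + (∑ i ∈ Finset.range k, f i + f k) [ZMOD m] := by
            calc PySem.Int.mod (s + ∑ i ∈ Finset.range k, f i) m + f k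
                ≡ (s + ∑ i ∈ Finset.range k, f i) + f k [ZMOD m] := e.add_right _
              _ = s + (∑ i ∈ Finset.range k, f i + f k) := by ring
          have := pvRed_congr m hc
          simp only [pvRedB, if_pos hm] at this
          rw [this]
    rw [h k 0]
    rcases eq_or_ne k 0 with hk | hk
    · subst hk; simp [pvRedB, pvMod_zero]
    · rw [if_neg hk]; simp [pvRedB, if_pos hm]

-- index lemmas
theorem pvG_map_range (n : Nat) (f : Nat → Int) {x : Nat} (h : x < n) :
    pvG ((List.range n).map f) x = f x := by
  simpa [pvG] using PySem.List.getD_map_range f n x 0 h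
theorem pvGG_map_range (n : Nat) (f : Nat → List Int) {r : Nat} (h : r < n) (c : Nat) :
    pvGG ((List.range n).map f) r c = pvG (f r) c := by
  simp [pvGG, pvG, List.getD_eq_getElem?_getD, List.getElem?_map, List.getElem?_range h]

theorem pvSum_eq (k : Nat) (f : Nat → Int) :
    ((List.range k).map f).sum = ∑ i ∈ Finset.range k, f i := rfl

theorem pvGG_MM (n : Nat) (A B : List (List Int)) {r c : Nat} (hr : r < n) (hc : c < n) :
    pvGG (pvMM n A B) r c = ∑ i ∈ Finset.range n, pvGG A r i * pvGG B i c := by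
  unfold pvMM
  rw [pvGG_map_range n _ hr, pvG_map_range n _ hc]
theorem pvGG_id (n : Nat) {r c : Nat} (hr : r < n) (hc : c < n) :
    pvGG (pvIdB n) r c = if r = c then 1 else 0 := by
  unfold pvIdB
  rw [pvGG_map_range n _ hr, pvG_map_range n _ hc]

-- identity collapse inside a product
theorem pvMM_id_left_entry (n : Nat) (X : List (List Int)) {r c : Nat} (hr : r < n) (hc : c < n) :
    pvGG (pvMM n (pvIdB n) X) r c = pvGG X r c := by
  rw [pvGG_MM n _ _ hr hc]
  rw [Finset.sum_congr rfl (fun i hi => by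
    rw [pvGG_id n hr (Finset.mem_range.mp hi), ite_mul, one_mul, zero_mul])]
  simp [Finset.sum_ite_eq, Finset.mem_range.mpr hr]

theorem pvMM_congr_right (n : Nat) (A X Y : List (List Int))
    (h : ∀ i c, i < n → c < n → pvGG X i c = pvGG Y i c) : pvMM n A X = pvMM n A Y := by
  unfold pvMM
  refine List.map_congr_left fun r hr => ?_
  refine List.map_congr_left fun c hc => ?_
  exact Finset.sum_congr rfl fun i hi => by
    rw [h i c (Finset.mem_range.mp hi) (List.mem_range.mp hc)]
theorem pvVM_congr_right (n : Nat) (v : List Int) (X Y : List (List Int))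
    (h : ∀ i c, i < n → c < n → pvGG X i c = pvGG Y i c) : pvVM n v X = pvVM n v Y := by
  unfold pvVM
  refine List.map_congr_left fun x hx => ?_
  exact Finset.sum_congr rfl fun y hy => by
    rw [h y x (Finset.mem_range.mp hy) (List.mem_range.mp hx)]

-- exact algebra
theorem pvMM_assoc (n : Nat) (A B C : List (List Int)) :
    pvMM n (pvMM n A B) C = pvMM n A (pvMM n B C) := by
  unfold pvMM
  refine List.map_congr_left fun r hr => ?_
  refine List.map_congr_left fun c hc => ?_
  have hr' := List.mem_range.mp hr
  have hc' := List.mem_range.mp hc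
  calc ∑ i ∈ Finset.range n, pvGG (pvMM n A B) r i * pvGG C i c
      = ∑ i ∈ Finset.range n, (∑ j ∈ Finset.range n, pvGG A r j * pvGG B j i) * pvGG C i c :=
        Finset.sum_congr rfl fun i hi => by rw [pvGG_MM n A B hr' (Finset.mem_range.mp hi)]
    _ = ∑ j ∈ Finset.range n, pvGG A r j * ∑ i ∈ Finset.range n, pvGG B j i * pvGG C i c := by
        simp only [Finset.sum_mul, Finset.mul_sum]
        rw [Finset.sum_comm]
        exact Finset.sum_congr rfl fun j _ => Finset.sum_congr rfl fun i _ => by ring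
    _ = ∑ j ∈ Finset.range n, pvGG A r j * pvGG (pvMM n B C) j c :=
        Finset.sum_congr rfl fun j hj => by rw [pvGG_MM n B C (Finset.mem_range.mp hj) hc']
theorem pvVM_VM (n : Nat) (v : List Int) (A B : List (List Int)) :
    pvVM n (pvVM n v A) B = pvVM n v (pvMM n A B) := by
  unfold pvVM
  refine List.map_congr_left fun x hx => ?_
  have hx' := List.mem_range.mp hx
  calc ∑ y ∈ Finset.range n, pvG ((List.range n).map (fun x => ∑ z ∈ Finset.range n, pvG v z * pvGG A z x)) y * pvGG B y x
      = ∑ y ∈ Finset.range n, (∑ z ∈ Finset.range n, pvG v z * pvGG A z y) * pvGG B y x :=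
        Finset.sum_congr rfl fun y hy => by rw [pvG_map_range n _ (Finset.mem_range.mp hy)]
    _ = ∑ z ∈ Finset.range n, pvG v z * ∑ y ∈ Finset.range n, pvGG A z y * pvGG B y x := by
        simp only [Finset.sum_mul, Finset.mul_sum]
        rw [Finset.sum_comm]
        exact Finset.sum_congr rfl fun j _ => Finset.sum_congr rfl fun i _ => by ring
    _ = ∑ z ∈ Finset.range n, pvG v z * pvGG (pvMM n A B) z x :=
        Finset.sum_congr rfl fun z hz => by rw [pvGG_MM n A B (Finset.mem_range.mp hz) hx']
theorem pvPow_one_entry (n : Nat) (M : List (List Int)) {r c : Nat} (hr : r < n) (hc : c < n) :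
    pvGG (pvPow n M 1) r c = pvGG M r c := by
  show pvGG (pvMM n (pvIdB n) M) r c = pvGG M r c
  exact pvMM_id_left_entry n M hr hc
theorem pvPow_double (n : Nat) (M : List (List Int)) (k : Nat) :
    pvPow n M (2 * k) = pvPow n (pvMM n M M) k := by
  induction k with
  | zero => rfl
  | succ k ih =>
    have h2 : 2 * (k + 1) = (2 * k + 1) + 1 := by ring
    rw [h2]
    show pvMM n (pvPow n M (2 * k + 1)) M = pvMM n (pvPow n (pvMM n M M) k) (pvMM n M M)
    show pvMM n (pvMM n (pvPow n M (2 * k)) M) M = _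
    rw [pvMM_assoc, ih]
theorem pvMM_pow_succ (n : Nat) (M : List (List Int)) (k : Nat) :
    pvMM n M (pvPow n M k) = pvPow n M (k + 1) := by
  induction k with
  | zero =>
    show pvMM n M (pvIdB n) = pvMM n (pvIdB n) M
    unfold pvMM
    refine List.map_congr_left fun r hr => ?_
    refine List.map_congr_left fun c hc => ?_
    have hr' := List.mem_range.mp hr
    have hc' := List.mem_range.mp hc
    calc ∑ i ∈ Finset.range n, pvGG M r i * pvGG (pvIdB n) i c
        = ∑ i ∈ Finset.range n, (if i = c then pvGG M r i else 0) :=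
          Finset.sum_congr rfl fun i hi => by
            rw [pvGG_id n (Finset.mem_range.mp hi) hc', mul_ite, mul_one, mul_zero]
      _ = pvGG M r c := by simp [Finset.sum_ite_eq', Finset.mem_range.mpr hc']
      _ = ∑ i ∈ Finset.range n, (if r = i then pvGG M i c else 0) := by
          simp [Finset.sum_ite_eq, Finset.mem_range.mpr hr']
      _ = ∑ i ∈ Finset.range n, pvGG (pvIdB n) r i * pvGG M i c :=
          Finset.sum_congr rfl fun i hi => by
            rw [pvGG_id n hr' (Finset.mem_range.mp hi), ite_mul, one_mul, zero_mul]
  | succ k ih =>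
    show pvMM n M (pvMM n (pvPow n M k) M) = pvMM n (pvPow n M (k + 1)) M
    rw [← pvMM_assoc, ih]

-- congruence is preserved by the reduced products
theorem pvVEq_sum (m : Int) (n : Nat) {v v' : List Int} {M M' : List (List Int)}
    (hv : pvVEq m n v v') (hM : pvMEq m n M M') (x : Nat) (hx : x < n) :
    (∑ y ∈ Finset.range n, pvG v y * pvGG M y x) ≡
      (∑ y ∈ Finset.range n, pvG v' y * pvGG M' y x) [ZMOD m] :=
  Int.ModEq.sum fun y hy =>
    (hv y (Finset.mem_range.mp hy)).mul (hM y x (Finset.mem_range.mp hy) hx)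
theorem pvMEq_sum (m : Int) (n : Nat) {A A' B B' : List (List Int)}
    (hA : pvMEq m n A A') (hB : pvMEq m n B B') (r c : Nat) (hr : r < n) (hc : c < n) :
    (∑ i ∈ Finset.range n, pvGG A r i * pvGG B i c) ≡
      (∑ i ∈ Finset.range n, pvGG A' r i * pvGG B' i c) [ZMOD m] :=
  Int.ModEq.sum fun i hi =>
    (hA r i hr (Finset.mem_range.mp hi)).mul (hB i c (Finset.mem_range.mp hi) hc)

-- port characterizations
theorem pvShape_headD {n : Nat} {M : List (List Int)} (h : pvShape n M) :
    (M.headD []).length = n := by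
  rcases M with _ | ⟨r, rs⟩
  · simpa using h.1
  · exact h.2 r List.mem_cons_self

theorem pvRowMultA_eq (row : List Int) (mat : List (List Int)) (m : Int) :
    pvRowMultA row mat m = (pvVM row.length row mat).map (pvRedB m) := by
  unfold pvRowMultA pvVM
  rw [List.map_map]
  refine List.map_congr_left fun x hx => ?_
  simp only [pvFold_sum, zero_add, Function.comp, pvRedB, pvG, pvGG]
theorem pvMatrixMultA_eq (n : Nat) (A B : List (List Int)) (m : Int)
    (hA : pvShape n A) (hB : pvShape n B) :
    pvMatrixMultA A B m = pvMatMulB n A B m := by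
  unfold pvMatrixMultA pvMatMulB
  rw [hA.1, pvShape_headD hB, pvShape_headD hA]
  refine List.map_congr_left fun r hr => ?_
  refine List.map_congr_left fun c hc => ?_
  rw [pvFold_red m n (fun i => (A.getD r []).getD i 0 * (B.getD i []).getD c 0), pvSum_eq]
theorem pvMatMulB_entry (n : Nat) (a b : List (List Int)) (m : Int) {r c : Nat}
    (hr : r < n) (hc : c < n) :
    pvGG (pvMatMulB n a b m) r c = pvRedB m (∑ i ∈ Finset.range n, pvGG a r i * pvGG b i c) := by
  unfold pvMatMulB
  rw [pvGG_map_range n _ hr, pvG_map_range n _ hc, pvSum_eq]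
  rfl
theorem pvMatMulB_shape (n : Nat) (a b : List (List Int)) (m : Int) :
    pvShape n (pvMatMulB n a b m) := by
  constructor
  · simp [pvMatMulB]
  · intro r hr
    unfold pvMatMulB at hr
    obtain ⟨i, hi, rfl⟩ := List.mem_map.mp hr
    simp

theorem pvVEq_refl (m : Int) (n : Nat) (v : List Int) : pvVEq m n v v :=
  fun _ _ => Int.ModEq.refl _
theorem pvMEq_refl (m : Int) (n : Nat) (M : List (List Int)) : pvMEq m n M M :=
  fun _ _ _ _ => Int.ModEq.refl _

theorem pvVM_red_congr (m : Int) (n : Nat) {v v' : List Int} {M M' : List (List Int)}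
    (hv : pvVEq m n v v') (hM : pvMEq m n M M') :
    (pvVM n v M).map (pvRedB m) = (pvVM n v' M').map (pvRedB m) := by
  unfold pvVM
  rw [List.map_map, List.map_map]
  refine List.map_congr_left fun x hx => ?_
  exact pvRed_congr m (pvVEq_sum m n hv hM x (List.mem_range.mp hx))

theorem pvRowMultA_VEq (m : Int) (n : Nat) {v v' : List Int} {M M' : List (List Int)}
    (hlen : v.length = n) (hv : pvVEq m n v v') (hM : pvMEq m n M M') :
    pvVEq m n (pvRowMultA v M m) (pvVM n v' M') := by
  intro x hx
  rw [pvRowMultA_eq, hlen]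
  unfold pvVM
  rw [List.map_map]
  rw [pvG_map_range n _ hx, pvG_map_range n _ hx]
  exact (pvRed_modeq m _).trans (pvVEq_sum m n hv hM x hx)

theorem pvMatMulB_MEq (m : Int) (n : Nat) {a a' b b' : List (List Int)}
    (ha : pvMEq m n a a') (hb : pvMEq m n b b') :
    pvMEq m n (pvMatMulB n a b m) (pvMM n a' b') := by
  intro r c hr hc
  rw [pvMatMulB_entry n a b m hr hc, pvGG_MM n a' b' hr hc]
  exact (pvRed_modeq m _).trans (pvMEq_sum m n ha hb r c hr hc)

theorem pvRowMultA_length (v : List Int) (M : List (List Int)) (m : Int) :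
    (pvRowMultA v M m).length = v.length := by
  simp [pvRowMultA]

-- the A-side loop invariant
theorem pvLoopA_eq (m : Int) (n : Nat) :
    ∀ p, 1 ≤ p → ∀ (v v' : List Int) (M M' : List (List Int)),
      v.length = n → pvShape n M → pvVEq m n v v' → pvMEq m n M M' →
      pvLoopA v M p m = (pvVM n v' (pvPow n M' p)).map (pvRedB m) := by
  intro p
  induction p using Nat.strong_induction_on with
  | _ p ih =>
    intro hp v v' M M' hlen hshape hv hM
    rw [pvLoopA, dif_neg (by omega : ¬ p = 0)]
    simp only []
    rcases eq_or_ne (p / 2) 0 with hp2 | hp2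
    · have hp1 : p = 1 := by omega
      subst hp1
      rw [if_pos hp2, if_pos (by norm_num)]
      rw [pvRowMultA_eq, hlen]
      rw [pvVM_congr_right n v' (pvPow n M' 1) M'
        (fun i c hi hc => pvPow_one_entry n M' hi hc)]
      exact pvVM_red_congr m n hv hM
    · rw [if_neg hp2]
      have hshape' : pvShape n (pvMatrixMultA M M m) := by
        rw [pvMatrixMultA_eq n M M m hshape hshape]
        exact pvMatMulB_shape n M M m
      have hMM : pvMEq m n (pvMatrixMultA M M m) (pvMM n M' M') := by
        rw [pvMatrixMultA_eq n M M m hshape hshape]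
        exact pvMatMulB_MEq m n hM hM
      rcases Nat.mod_two_eq_zero_or_one p with hpar | hpar
      · -- even bit: row unchanged
        rw [if_neg (by omega : ¬ p % 2 = 1)]
        rw [ih (p / 2) (by omega) (by omega) v v' _ (pvMM n M' M') hlen hshape' hv hMM]
        rw [← pvPow_double]
        rw [(by omega : 2 * (p / 2) = p)]
      · rw [if_pos hpar]
        rw [ih (p / 2) (by omega) (by omega) (pvRowMultA v M m) (pvVM n v' M') _
          (pvMM n M' M') (by rw [pvRowMultA_length, hlen]) hshape'
          (pvRowMultA_VEq m n hlen hv hM) hMM]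
        rw [← pvPow_double, pvVM_VM, pvMM_pow_succ]
        rw [(by omega : 2 * (p / 2) + 1 = p)]

-- the B-side loop invariant
theorem pvLoopB_eq (m : Int) (n : Nat) :
    ∀ p, 1 ≤ p → ∀ (R R' base B' : List (List Int)),
      pvMEq m n R R' → pvMEq m n base B' →
      pvShape n (pvLoopB n R base p m) ∧
        pvMEq m n (pvLoopB n R base p m) (pvMM n R' (pvPow n B' p)) := by
  intro p
  induction p using Nat.strong_induction_on with
  | _ p ih =>
    intro hp R R' base B' hR hbase
    rw [pvLoopB, dif_neg (by omega : ¬ p = 0)]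
    simp only []
    rcases eq_or_ne (p / 2) 0 with hp2 | hp2
    · have hp1 : p = 1 := by omega
      subst hp1
      rw [if_pos hp2, if_pos (by norm_num)]
      refine ⟨pvMatMulB_shape n R base m, ?_⟩
      rw [pvMM_congr_right n R' (pvPow n B' 1) B'
        (fun i c hi hc => pvPow_one_entry n B' hi hc)]
      exact pvMatMulB_MEq m n hR hbase
    · rw [if_neg hp2]
      have hbase' : pvMEq m n (pvMatMulB n base base m) (pvMM n B' B') :=
        pvMatMulB_MEq m n hbase hbase
      rcases Nat.mod_two_eq_zero_or_one p with hpar | hpar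
      · rw [if_neg (by omega : ¬ p % 2 = 1)]
        obtain ⟨hsh, heq⟩ := ih (p / 2) (by omega) (by omega) R R' _ (pvMM n B' B') hR hbase'
        refine ⟨hsh, ?_⟩
        rw [← pvPow_double, (by omega : 2 * (p / 2) = p)] at heq
        exact heq
      · rw [if_pos hpar]
        obtain ⟨hsh, heq⟩ := ih (p / 2) (by omega) (by omega) (pvMatMulB n R base m)
          (pvMM n R' B') _ (pvMM n B' B') (pvMatMulB_MEq m n hR hbase) hbase'
        refine ⟨hsh, ?_⟩
        rw [← pvPow_double, pvMM_assoc, pvMM_pow_succ,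
          (by omega : 2 * (p / 2) + 1 = p)] at heq
        exact heq

-- ===== VERDICT (by name: the statement is the Claim_ definition above) =====
theorem row_matrix_pow_mult_spec : Claim_equal_row_matrix_pow_mult := by
  intro row_in mat_in power m hdom hpre
  unfold Spec_row_matrix_pow_mult row_matrix_pow_mult row_matrix_pow_mult_alt
  obtain ⟨hpow, hrest⟩ := hpre
  rw [(List.map_id' mat_in : mat_in.map (fun matrow => matrow) = mat_in)]
  rcases eq_or_ne power 0 with h0 | h0
  · subst h0
    rw [if_pos rfl]
    rw [(by decide : (0 : Int).toNat = 0), pvLoopA, dif_pos rfl]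
  · rw [if_neg h0]
    obtain ⟨hlen, hrows, _⟩ := hrest.resolve_left h0
    simp only [hlen]
    have hp1 : 1 ≤ power.toNat := by omega
    have hA := pvLoopA_eq m row_in.length power.toNat hp1 row_in row_in mat_in mat_in rfl
      ⟨hlen, hrows⟩ (pvVEq_refl _ _ _) (pvMEq_refl _ _ _)
    obtain ⟨hsh, heq⟩ := pvLoopB_eq m row_in.length power.toNat hp1 (pvIdB row_in.length)
      (pvIdB row_in.length) mat_in mat_in (pvMEq_refl _ _ _) (pvMEq_refl _ _ _)
    rw [hA]
    have hR : pvMEq m row_in.length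
        (pvLoopB row_in.length (pvIdB row_in.length) mat_in power.toNat m)
        (pvPow row_in.length mat_in power.toNat) := by
      intro r c hr hc
      exact (heq r c hr hc).trans
        (by rw [pvMM_id_left_entry _ _ hr hc])
    unfold pvVM
    rw [List.map_map]
    refine (List.map_congr_left fun x hx => ?_).symm
    have hx' := List.mem_range.mp hx
    rw [pvSum_eq]
    refine pvRed_congr m ?_
    exact pvVEq_sum m row_in.length (pvVEq_refl _ _ row_in) hR x hx'
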